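-- pv_equiv track=rewrite | github.com/zcanann/SFA-Decomp | tools/sdk_try_linkage_flip.py | summarize_failure
-- ===== SOURCE A (Python) =====
-- def summarize_failure(output: str) -> str:
--     lines = [line.strip() for line in output.splitlines() if line.strip()]
--     for needle in (
--         "multiply-defined:",
--         "undefined:",
--         "computed checksum",
--         "FAILED:",
--         "Linker Error:",
--         "Compiler:",
--     ):
--         for line in lines:
--             if needle in line:
--                 return line
--     return lines[-1] if lines else "no output"
-- ===== SOURCE B (Python) =====
-- _NEEDLES = [
--     "multiply-defined:",
--     "undefined:",
--     "computed checksum",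
--     "FAILED:",
--     "Linker Error:",
--     "Compiler:",
-- ]
--
-- def summarize_failure(output: str) -> str:
--     lines = [line.strip() for line in output.splitlines() if line.strip()]
--     best_rank = len(_NEEDLES)
--     best_line = None
--     for line in lines:
--         r = next((i for i, n in enumerate(_NEEDLES) if n in line), len(_NEEDLES))
--         if r < best_rank:
--             best_rank, best_line = r, line
--     if best_line is not None:
--         return best_line
--     return lines[-1] if lines else "no output"
-- ===== Notes on version B (the rewrite author's own statement) =====
-- stated objective: alternative
-- what changed: Replaced A's needle-outer/line-inner short-circuit double loop by a single pass over the lines maintaining a running best (minimum needle rank, earliest line wins by strict comparison), with each line's rank computed from the needle list once.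
import Mathlib
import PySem

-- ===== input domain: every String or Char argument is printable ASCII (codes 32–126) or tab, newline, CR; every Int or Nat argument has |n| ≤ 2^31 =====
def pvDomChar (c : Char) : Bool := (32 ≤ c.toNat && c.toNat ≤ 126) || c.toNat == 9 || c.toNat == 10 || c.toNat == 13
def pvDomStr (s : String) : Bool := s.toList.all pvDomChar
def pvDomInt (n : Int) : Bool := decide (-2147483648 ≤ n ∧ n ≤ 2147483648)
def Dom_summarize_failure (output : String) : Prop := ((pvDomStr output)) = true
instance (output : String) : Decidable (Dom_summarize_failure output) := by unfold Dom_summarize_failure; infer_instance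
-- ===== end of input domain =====

-- B replaces A's needle-outer/line-inner short-circuit double loop by one pass over the
-- lines keeping a running best (minimum needle rank, earliest line wins); alternative
-- decomposition, same cost.


-- the needle tuple of the Python source (shared literal constant)
def sfNeedles : List String :=
  ["multiply-defined:", "undefined:", "computed checksum", "FAILED:", "Linker Error:", "Compiler:"]

-- [line.strip() for line in output.splitlines() if line.strip()] (identical in A and in B)
def sfClean (output : String) : List String :=
  ((PySem.Str.splitlines output).filter (fun line => PySem.Str.strip line ≠ "")).map PySem.Str.strip

-- ===== PORT A =====
-- inner 'for line in lines: if needle in line: return line'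
def sfFindLine (needle : String) : List String → Option String
  | [] => none
  | l :: ls => if PySem.Str.isIn needle l then some l else sfFindLine needle ls

-- outer 'for needle in (…)': first needle with a matching line
def sfLoopNeedles : List String → List String → Option String
  | [], _ => none
  | n :: ns, lines =>
      match sfFindLine n lines with
      | some l => some l
      | none => sfLoopNeedles ns lines

def summarize_failure (output : String) : String :=
  let lines := sfClean output
  match sfLoopNeedles sfNeedles lines with
  | some l => l
  | none =>
      match lines.getLast? with
      | some l => l
      | none => "no output"

-- ===== PORT B =====
-- next((i for i, n in enumerate(_NEEDLES) if n in line), len(_NEEDLES))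
def sfRank (line : String) : Nat :=
  match sfNeedles.findIdx? (fun n => PySem.Str.isIn n line) with
  | some i => i
  | none => sfNeedles.length

-- single pass, running best (best_rank, best_line); strict '<' so the earliest line wins
def sfBest : List String → Nat → Option String → Nat × Option String
  | [], r, b => (r, b)
  | l :: ls, r, b => if sfRank l < r then sfBest ls (sfRank l) (some l) else sfBest ls r b

def summarize_failure_alt (output : String) : String :=
  let lines := sfClean output
  match (sfBest lines sfNeedles.length none).2 with
  | some l => l
  | none =>
      match lines.getLast? with
      | some l => l
      | none => "no output"

-- ===== PRECONDITION & SPEC =====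
def Spec_summarize_failure (output : String) (out : String) : Prop := out = summarize_failure_alt output
instance (output : String) (out : String) : Decidable (Spec_summarize_failure output out) := by unfold Spec_summarize_failure; infer_instance

-- ===== CLAIM (what is proved, stated in full; the proofs are below) =====
def Claim_equal_summarize_failure : Prop := ∀ (output : String), Dom_summarize_failure output → Spec_summarize_failure output (summarize_failure output)

-- ===== LEMMAS AND PROOFS =====

-- rank of a line with respect to an arbitrary needle list (sfRank = sfRankOf sfNeedles)
def sfRankOf (ks : List String) (line : String) : Nat :=
  match ks.findIdx? (fun n => PySem.Str.isIn n line) with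
  | some i => i
  | none => ks.length

-- minimum rank over the lines, with base c
def sfMin (ks : List String) (lines : List String) (c : Nat) : Nat :=
  lines.foldr (fun l a => min (sfRankOf ks l) a) c

theorem sfRankOf_le (ks : List String) (l : String) : sfRankOf ks l ≤ ks.length := by
  unfold sfRankOf
  cases h : ks.findIdx? (fun n => PySem.Str.isIn n l) with
  | none => simp
  | some i =>
      have := List.findIdx?_eq_some_iff_findIdx_eq.mp h
      show i ≤ ks.length
      omega

theorem sfRankOf_cons (k : String) (ks : List String) (l : String) :
    sfRankOf (k :: ks) l = if PySem.Str.isIn k l then 0 else sfRankOf ks l + 1 := by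
  unfold sfRankOf
  rw [List.findIdx?_cons]
  by_cases h : PySem.Str.isIn k l = true
  · simp only [h, if_true]
  · simp only [h, Bool.false_eq_true, if_false]
    cases hf : ks.findIdx? (fun n => PySem.Str.isIn n l) with
    | none => simp
    | some i => simp

theorem find?_congr_mem {α : Type} (p q : α → Bool) (l : List α)
    (h : ∀ x ∈ l, p x = q x) : l.find? p = l.find? q := by
  induction l with
  | nil => rfl
  | cons a l ih =>
      have ha := h a (by simp)
      simp only [List.find?_cons, ha]
      cases hq : q a with
      | true => rfl
      | false => exact ih (fun x hx => h x (by simp [hx]))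

theorem sfFindLine_eq (n : String) (ls : List String) :
    sfFindLine n ls = ls.find? (fun l => PySem.Str.isIn n l) := by
  induction ls with
  | nil => rfl
  | cons l ls ih => simp only [sfFindLine, List.find?_cons]; split_ifs with h <;> simp_all

theorem sfMin_le_of_mem (ks : List String) (lines : List String) (c : Nat) (l : String)
    (hl : l ∈ lines) : sfMin ks lines c ≤ sfRankOf ks l := by
  induction lines with
  | nil => cases hl
  | cons x xs ih =>
      simp only [sfMin, List.foldr_cons] at *
      rcases List.mem_cons.mp hl with rfl | h
      · omega
      · have := ih h; omega

theorem sfMin_le_base (ks lines : List String) (c : Nat) : sfMin ks lines c ≤ c := by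
  induction lines with
  | nil => simp [sfMin]
  | cons x xs ih => simp only [sfMin, List.foldr_cons] at *; omega

theorem sfMin_succ (k : String) (ks lines : List String)
    (h : ∀ l ∈ lines, ¬ PySem.Str.isIn k l) :
    sfMin (k :: ks) lines ((k :: ks).length) = sfMin ks lines ks.length + 1 := by
  induction lines with
  | nil => simp [sfMin]
  | cons x xs ih =>
      have hx := h x (by simp)
      have ihx := ih (fun l hl => h l (by simp [hl]))
      simp only [sfMin, List.foldr_cons] at *
      rw [sfRankOf_cons]
      simp only [hx, Bool.false_eq_true, if_false, ihx]
      omega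

-- A's double loop characterised: first line whose rank equals the minimum rank, or none
theorem sfLoopNeedles_eq (ks lines : List String) :
    sfLoopNeedles ks lines =
      if sfMin ks lines ks.length < ks.length then
        lines.find? (fun l => sfRankOf ks l == sfMin ks lines ks.length)
      else none := by
  induction ks generalizing lines with
  | nil =>
      have h0 : sfMin [] lines 0 = 0 := by
        have := sfMin_le_base [] lines 0
        omega
      simp [sfLoopNeedles, h0]
  | cons k ks ih =>
      simp only [sfLoopNeedles, sfFindLine_eq]
      cases hf : lines.find? (fun l => PySem.Str.isIn k l) with
      | some l0 =>
          -- some line contains k: the minimum rank is 0 and A returns the first such line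
          have hl0 : l0 ∈ lines := List.mem_of_find?_eq_some hf
          have hk : PySem.Str.isIn k l0 = true := List.find?_some hf
          have hr0 : sfRankOf (k :: ks) l0 = 0 := by rw [sfRankOf_cons, if_pos hk]
          have hmin : sfMin (k :: ks) lines ((k :: ks).length) = 0 := by
            have h1 := sfMin_le_of_mem (k :: ks) lines ((k :: ks).length) l0 hl0
            omega
          rw [hmin]
          rw [if_pos (by simp)]
          rw [find?_congr_mem (fun l => PySem.Str.isIn k l)
                (fun l => sfRankOf (k :: ks) l == 0) lines ?_] at hf
          · exact hf.symm
          · intro x _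
            show PySem.Str.isIn k x = (sfRankOf (k :: ks) x == 0)
            rw [sfRankOf_cons]
            rcases Bool.eq_false_or_eq_true (PySem.Str.isIn k x) with hx | hx
            · rw [hx]; simp
            · rw [hx]; simp
      | none =>
          -- no line contains k: every rank shifts by one and the search recurses
          have hnone : ∀ l ∈ lines, ¬ PySem.Str.isIn k l := by
            intro l hl hc
            have := List.find?_eq_none.mp hf l hl
            simp only [PySem.Str.isIn_eq] at hc
            simp [hc] at this
          rw [ih lines, sfMin_succ k ks lines hnone]
          simp only [List.length_cons]
          by_cases hlt : sfMin ks lines ks.length < ks.length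
          · rw [if_pos hlt,
              if_pos (show sfMin ks lines ks.length + 1 < ks.length + 1 by omega)]
            apply find?_congr_mem
            intro x hx
            show (sfRankOf ks x == sfMin ks lines ks.length) =
              (sfRankOf (k :: ks) x == sfMin ks lines ks.length + 1)
            rw [sfRankOf_cons]
            have := hnone x hx
            simp only [this, Bool.false_eq_true, if_false]
            by_cases he : sfRankOf ks x = sfMin ks lines ks.length
            · rw [he]; simp
            · rw [show ((sfRankOf ks x == sfMin ks lines ks.length) = false) from by
                  simp only [beq_eq_false_iff_ne]; exact he,
                show ((sfRankOf ks x + 1 == sfMin ks lines ks.length + 1) = false) from by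
                  simp only [beq_eq_false_iff_ne]; omega]
          · rw [if_neg hlt,
              if_neg (show ¬ (sfMin ks lines ks.length + 1 < ks.length + 1) by omega)]

-- B's fold characterised: running best = first line achieving the minimum rank
theorem sfBest_eq (lines : List String) (r : Nat) (b : Option String)
    (hr : r ≤ sfNeedles.length) :
    sfBest lines r b =
      (min (sfMin sfNeedles lines sfNeedles.length) r,
       if sfMin sfNeedles lines sfNeedles.length < r then
         lines.find? (fun l => sfRankOf sfNeedles l == sfMin sfNeedles lines sfNeedles.length)
       else b) := by
  induction lines generalizing r b with
  | nil =>
      simp only [sfBest, sfMin, List.foldr_nil, List.find?_nil]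
      rw [if_neg (by omega), Prod.mk.injEq]
      exact ⟨by omega, rfl⟩
  | cons l ls ih =>
      have hle : sfRankOf sfNeedles l ≤ sfNeedles.length := sfRankOf_le _ _
      have hM : sfMin sfNeedles ls sfNeedles.length ≤ sfNeedles.length :=
        sfMin_le_base _ _ _
      have hrank : sfRank l = sfRankOf sfNeedles l := rfl
      have hmin_cons : sfMin sfNeedles (l :: ls) sfNeedles.length =
          min (sfRankOf sfNeedles l) (sfMin sfNeedles ls sfNeedles.length) := by
        simp [sfMin]
      simp only [sfBest, hrank, hmin_cons]
      by_cases h : sfRankOf sfNeedles l < r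
      · rw [if_pos h, ih _ _ hle, Prod.mk.injEq]
        by_cases hm : sfMin sfNeedles ls sfNeedles.length < sfRankOf sfNeedles l
        · rw [Nat.min_eq_right (Nat.le_of_lt hm)]
          refine ⟨by omega, ?_⟩
          rw [if_pos hm, if_pos (show sfMin sfNeedles ls sfNeedles.length < r by omega),
            List.find?_cons,
            show ((sfRankOf sfNeedles l == sfMin sfNeedles ls sfNeedles.length) = false) from
              by simp only [beq_eq_false_iff_ne]; omega]
        · rw [Nat.min_eq_left (show sfRankOf sfNeedles l ≤ sfMin sfNeedles ls sfNeedles.length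
              by omega)]
          refine ⟨by omega, ?_⟩
          rw [if_neg hm, if_pos h, List.find?_cons,
            show ((sfRankOf sfNeedles l == sfRankOf sfNeedles l) = true) from by simp]
      · rw [if_neg h, ih _ _ hr, Prod.mk.injEq]
        by_cases hm : sfMin sfNeedles ls sfNeedles.length < r
        · rw [show min (sfRankOf sfNeedles l) (sfMin sfNeedles ls sfNeedles.length) =
                sfMin sfNeedles ls sfNeedles.length by omega]
          refine ⟨by omega, ?_⟩
          rw [if_pos hm, if_pos hm, List.find?_cons,
            show ((sfRankOf sfNeedles l == sfMin sfNeedles ls sfNeedles.length) = false) from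
              by simp only [beq_eq_false_iff_ne]; omega]
        · rw [if_neg hm,
            if_neg (show ¬ (min (sfRankOf sfNeedles l)
              (sfMin sfNeedles ls sfNeedles.length) < r) by omega)]
          exact ⟨by omega, rfl⟩

-- ===== VERDICT (by name: the statement is the Claim_ definition above) =====
theorem summarize_failure_spec : Claim_equal_summarize_failure := by
  intro output _
  unfold Spec_summarize_failure summarize_failure summarize_failure_alt
  simp only [sfLoopNeedles_eq sfNeedles (sfClean output),
    sfBest_eq (sfClean output) sfNeedles.length none (le_refl _)]
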